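-- pv_equiv track=rewrite | github.com/bookers1897/Manga-Negus | sources/weebcentral_v2.py | _pick_srcset_url
-- ===== SOURCE A (Python) =====
-- from typing import List, Optional, Dict, Any
--
-- def _pick_srcset_url(srcset: str) -> Optional[str]:
--     """Pick a usable URL from a srcset string."""
--     if not srcset:
--         return None
--     parts = [p.strip() for p in srcset.split(',') if p.strip()]
--     if not parts:
--         return None
--     candidate = parts[-1].split()[0]
--     return candidate or None
-- ===== SOURCE B (Python) =====
-- from typing import Optional
--
-- def _pick_srcset_url(srcset: str) -> Optional[str]:
--     """Pick a usable URL from a srcset string.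
--
--     Single character-level pass (state machine): collects the first
--     whitespace-delimited token of the current comma-separated segment and
--     remembers the token of the last segment that had one.  No intermediate
--     lists of segments are ever built.
--     """
--     ans = None
--     token = []          # chars of the first token of the current segment
--     token_done = False  # first token of current segment already complete
--     for ch in srcset:
--         if ch == ',':
--             if token:
--                 ans = ''.join(token)
--             token = []
--             token_done = False
--         elif ch.isspace():
--             if token:
--                 token_done = True
--         elif not token_done:
--             token.append(ch)
--     if token:
--         ans = ''.join(token)
--     return ans
-- ===== Notes on version B (the rewrite author's own statement) =====
-- stated objective: alternative
-- what changed: Replaces A's staged pipeline (split on commas, strip each part, filter out empties, index [-1], split the winner) by a single character-level state machine that scans the string once, collecting the first whitespace-delimited token of each comma segment and remembering the token of the last non-empty segment, never materialising any list of segments.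
import Mathlib
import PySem

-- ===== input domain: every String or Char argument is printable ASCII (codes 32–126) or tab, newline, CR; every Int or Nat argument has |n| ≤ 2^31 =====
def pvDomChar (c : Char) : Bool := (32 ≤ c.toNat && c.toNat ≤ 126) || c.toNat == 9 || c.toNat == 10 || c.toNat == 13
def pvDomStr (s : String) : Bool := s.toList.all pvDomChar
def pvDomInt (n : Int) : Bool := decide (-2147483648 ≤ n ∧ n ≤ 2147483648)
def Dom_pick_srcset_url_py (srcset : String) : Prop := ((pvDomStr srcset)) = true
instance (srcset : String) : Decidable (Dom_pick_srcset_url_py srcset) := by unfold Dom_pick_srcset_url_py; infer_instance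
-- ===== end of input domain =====

-- B replaces A's split/strip/filter/index pipeline by a single character-level state
-- machine over the string that never builds the list of segments (objective: alternative).

-- ===== PORT A =====
def pick_srcset_url_py (srcset : String) : Option String :=
  if srcset = "" then none             -- if not srcset: return None
  else
    -- parts = [p.strip() for p in srcset.split(',') if p.strip()]  (split? is some: sep "," ≠ "")
    let parts := (((PySem.Str.split? srcset ",").getD []).map PySem.Str.strip).filter (fun p => p ≠ "")
    if parts = [] then none            -- if not parts: return None
    else
      match PySem.List.pyGet? parts (-1) with       -- parts[-1]
      | none => none                   -- unreachable: parts ≠ []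
      | some last =>
        match PySem.List.pyGet? (PySem.Str.split₀ last) 0 with   -- .split()[0]
        | none => none                 -- unreachable: last is non-empty and stripped
        | some c => if c = "" then none else some c              -- candidate or None

-- ===== PORT B =====
-- one step of the state machine: state = (ans, token chars so far, token done flag)
def pvStep (st : Option String × List Char × Bool) (c : Char) : Option String × List Char × Bool :=
  if c = ',' then
    ((if st.2.1 = [] then st.1 else some (String.ofList st.2.1)), [], false)
  else if PySem.Chars.isspace c then
    (st.1, st.2.1, if st.2.1 = [] then st.2.2 else true)
  else if st.2.2 then st
  else (st.1, st.2.1 ++ [c], st.2.2)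

def pick_srcset_url_py_alt (srcset : String) : Option String :=
  let st := srcset.toList.foldl pvStep (none, [], false)
  if st.2.1 = [] then st.1 else some (String.ofList st.2.1)

-- ===== PRECONDITION & SPEC =====
def Spec_pick_srcset_url_py (srcset : String) (out : Option String) : Prop := out = pick_srcset_url_py_alt srcset
instance (srcset : String) (out : Option String) : Decidable (Spec_pick_srcset_url_py srcset out) := by unfold Spec_pick_srcset_url_py; infer_instance

-- ===== CLAIM (what is proved, stated in full; the proofs are below) =====
def Claim_equal_pick_srcset_url_py : Prop := ∀ (srcset : String), Dom_pick_srcset_url_py srcset → Spec_pick_srcset_url_py srcset (pick_srcset_url_py srcset)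

-- ===== LEMMAS AND PROOFS =====

-- "not a space" predicate for tokens
def pvP (c : Char) : Bool := !PySem.Chars.isspace c

-- structural model of srcset.split(',')
def pvSegs : List Char → List (List Char)
  | [] => [[]]
  | c :: r =>
    if c = ',' then [] :: pvSegs r
    else match pvSegs r with
      | [] => [[c]]
      | s :: ss => (c :: s) :: ss

-- first whitespace-delimited token of a segment
def pvTok (s : List Char) : List Char := (s.dropWhile PySem.Chars.isspace).takeWhile pvP

-- structural model of str.split() (PySem.Chars.split₀.go without the accumulator)
def pvAux : List Char → List Char → List (List Char)
  | cur, [] => if cur = [] then [] else [cur.reverse]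
  | cur, c :: r =>
    if PySem.Chars.isspace c then
      (if cur = [] then pvAux [] r else cur.reverse :: pvAux [] r)
    else pvAux (c :: cur) r

def pvCommit (t : List Char) (a : Option String) : Option String :=
  if t = [] then a else some (String.ofList t)

def pvRun (toks : List (List Char)) (a : Option String) : Option String :=
  toks.foldl (fun acc x => pvCommit x acc) a

theorem pvSegs_ne_nil (cs : List Char) : pvSegs cs ≠ [] := by
  cases cs with
  | nil => simp [pvSegs]
  | cons c r =>
    simp only [pvSegs]
    split
    · simp
    · split <;> simp

theorem splitOn_go_eq (fuel : Nat) : ∀ (l cur : List Char) (acc : List (List Char)),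
    l.length < fuel →
    PySem.Chars.splitOn.go [','] fuel l cur acc =
      acc.reverse ++ (match pvSegs l with
        | [] => [cur.reverse]
        | s :: ss => (cur.reverse ++ s) :: ss) := by
  induction fuel with
  | zero => intro l cur acc h; omega
  | succ f ih =>
    intro l cur acc h
    cases l with
    | nil => simp [PySem.Chars.splitOn.go, pvSegs]
    | cons c rest =>
      by_cases hc : c = ','
      · subst hc
        rw [show PySem.Chars.splitOn.go [','] (f+1) (',' :: rest) cur acc
              = PySem.Chars.splitOn.go [','] f rest [] (cur.reverse :: acc) from by
            simp [PySem.Chars.splitOn.go, List.isPrefixOf]]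
        rw [ih rest [] (cur.reverse :: acc) (by simpa using h)]
        simp only [pvSegs]
        cases hsp : pvSegs rest with
        | nil => exact absurd hsp (pvSegs_ne_nil rest)
        | cons s ss => simp
      · rw [show PySem.Chars.splitOn.go [','] (f+1) (c :: rest) cur acc
              = PySem.Chars.splitOn.go [','] f rest (c :: cur) acc from by
            simp only [PySem.Chars.splitOn.go, List.isPrefixOf, Bool.and_true, beq_iff_eq]
            rw [if_neg (fun hh => hc hh.symm)]]
        rw [ih rest (c :: cur) acc (by simpa using h)]
        simp only [pvSegs, if_neg hc]
        cases hsp : pvSegs rest with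
        | nil => exact absurd hsp (pvSegs_ne_nil rest)
        | cons s ss => simp

theorem splitOn_comma_eq (cs : List Char) : PySem.Chars.splitOn cs [','] = pvSegs cs := by
  unfold PySem.Chars.splitOn
  rw [splitOn_go_eq (cs.length + 1) cs [] [] (by omega)]
  cases hsp : pvSegs cs with
  | nil => exact absurd hsp (pvSegs_ne_nil cs)
  | cons s ss => simp

theorem split₀_go_eq (l : List Char) : ∀ (cur : List Char) (acc : List (List Char)),
    PySem.Chars.split₀.go l cur acc = acc.reverse ++ pvAux cur l := by
  induction l with
  | nil =>
    intro cur acc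
    by_cases hc : cur = [] <;> simp [PySem.Chars.split₀.go, pvAux, hc]
  | cons c r ih =>
    intro cur acc
    by_cases hs : PySem.Chars.isspace c
    · by_cases hc : cur = []
      · simp [PySem.Chars.split₀.go, pvAux, hs, hc, ih]
      · simp [PySem.Chars.split₀.go, pvAux, hs, hc, ih]
    · simp [PySem.Chars.split₀.go, pvAux, hs, ih]

theorem split₀_eq (l : List Char) : PySem.Chars.split₀ l = pvAux [] l := by
  unfold PySem.Chars.split₀
  simpa using split₀_go_eq l [] []

theorem pvAux_head_of_cur (r : List Char) : ∀ (cur : List Char), cur ≠ [] →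
    (pvAux cur r).head? = some (cur.reverse ++ r.takeWhile pvP) := by
  induction r with
  | nil => intro cur hc; simp [pvAux, hc]
  | cons c r ih =>
    intro cur hc
    by_cases hs : PySem.Chars.isspace c
    · simp [pvAux, hs, hc, List.takeWhile_cons, pvP]
    · rw [show pvAux cur (c :: r) = pvAux (c :: cur) r from by simp [pvAux, hs]]
      rw [ih (c :: cur) (by simp)]
      simp [List.takeWhile_cons, pvP, hs]

theorem pvAux_head (r : List Char) (h : r.dropWhile PySem.Chars.isspace ≠ []) :
    (pvAux [] r).head? = some (pvTok r) := by
  induction r with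
  | nil => simp at h
  | cons c r ih =>
    by_cases hs : PySem.Chars.isspace c
    · rw [List.dropWhile_cons_of_pos hs] at h
      rw [show pvAux [] (c :: r) = pvAux [] r from by simp [pvAux, hs]]
      rw [ih h]
      simp [pvTok, List.dropWhile_cons_of_pos hs]
    · simp only [pvAux, if_neg hs]
      rw [pvAux_head_of_cur r [c] (by simp)]
      simp [pvTok, List.dropWhile_cons_of_neg hs, List.takeWhile_cons, pvP, hs]

-- decomposition d = rstrip d ++ (all-space tail)
theorem rstrip_decomp (d : List Char) :
    d = PySem.Chars.rstrip d ++ (d.reverse.takeWhile PySem.Chars.isspace).reverse ∧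
    (∀ c ∈ (d.reverse.takeWhile PySem.Chars.isspace).reverse, PySem.Chars.isspace c = true) := by
  constructor
  · calc d = d.reverse.reverse := by simp
      _ = (List.takeWhile PySem.Chars.isspace d.reverse
            ++ List.dropWhile PySem.Chars.isspace d.reverse).reverse := by
          rw [List.takeWhile_append_dropWhile]
      _ = PySem.Chars.rstrip d ++ (d.reverse.takeWhile PySem.Chars.isspace).reverse := by
          rw [List.reverse_append]; rfl
  · intro c hc
    rw [List.mem_reverse] at hc
    exact List.mem_takeWhile_imp hc

theorem rstrip_eq_nil_iff (d : List Char) :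
    PySem.Chars.rstrip d = [] ↔ ∀ c ∈ d, PySem.Chars.isspace c = true := by
  unfold PySem.Chars.rstrip
  rw [List.reverse_eq_nil_iff, List.dropWhile_eq_nil_iff]
  simp

-- token of the head shape of strip
theorem strip_head (s : List Char) (h : PySem.Chars.strip s ≠ []) :
    ∃ c t, PySem.Chars.strip s = c :: t ∧ PySem.Chars.isspace c = false := by
  have hstrip : PySem.Chars.strip s = PySem.Chars.rstrip (PySem.Chars.lstrip s) := rfl
  obtain ⟨hdec, _⟩ := rstrip_decomp (PySem.Chars.lstrip s)
  cases hrs : PySem.Chars.rstrip (PySem.Chars.lstrip s) with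
  | nil => exact absurd (hstrip.trans hrs) h
  | cons c' t' =>
    refine ⟨c', t', hstrip.trans hrs, ?_⟩
    have hhead : (PySem.Chars.lstrip s).head? = some c' := by
      rw [hdec, hrs]; rfl
    have hdw := List.head?_dropWhile_not PySem.Chars.isspace s
    rw [show List.dropWhile PySem.Chars.isspace s = PySem.Chars.lstrip s from rfl, hhead] at hdw
    simpa using hdw

theorem takeWhile_append_all_space (a e : List Char)
    (he : ∀ c ∈ e, PySem.Chars.isspace c = true) :
    (a ++ e).takeWhile pvP = a.takeWhile pvP := by
  rw [List.takeWhile_append]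
  split
  · rename_i hlen
    have ha : a.takeWhile pvP = a :=
      (List.takeWhile_sublist _).eq_of_length_le (le_of_eq hlen.symm)
    cases e with
    | nil => simp [ha]
    | cons c r =>
      rw [List.takeWhile_cons_of_neg (by simp [pvP, he c (by simp)])]
      simp [ha]
  · rfl

theorem pvTok_strip (s : List Char) (h : PySem.Chars.strip s ≠ []) :
    pvTok (PySem.Chars.strip s) = pvTok s := by
  obtain ⟨c, t, hct, hcns⟩ := strip_head s h
  unfold pvTok
  have hstrip_drop : (PySem.Chars.strip s).dropWhile PySem.Chars.isspace = PySem.Chars.strip s := by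
    rw [hct]; rw [List.dropWhile_cons_of_neg (by simp [hcns])]
  rw [hstrip_drop]
  -- strip s = rstrip (lstrip s); lstrip s = dropWhile isspace s
  unfold PySem.Chars.strip
  set d := PySem.Chars.lstrip s with hd
  have hds : s.dropWhile PySem.Chars.isspace = d := rfl
  obtain ⟨hdec, hsp⟩ := rstrip_decomp d
  rw [hds]
  conv_rhs => rw [hdec]
  rw [takeWhile_append_all_space _ _ hsp]

theorem pvTok_eq_nil_iff (s : List Char) : pvTok s = [] ↔ PySem.Chars.strip s = [] := by
  unfold pvTok PySem.Chars.strip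
  set d := PySem.Chars.lstrip s with hd
  have hds : s.dropWhile PySem.Chars.isspace = d := rfl
  rw [hds]
  cases hld : d with
  | nil => simp [PySem.Chars.rstrip]
  | cons c t =>
    have hcns : PySem.Chars.isspace c = false := by
      have := List.head?_dropWhile_not (p := PySem.Chars.isspace) (l := s)
      rw [hds, hld] at this; simpa using this
    constructor
    · intro htk
      rw [List.takeWhile_cons_of_pos (by simp [pvP, hcns])] at htk
      simp at htk
    · intro hrs
      rw [rstrip_eq_nil_iff] at hrs
      have := hrs c (by simp)
      rw [this] at hcns; simp at hcns

-- the automaton, run from any state, computes pvRun over the segment tokens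
theorem pvStep_run (cs : List Char) : ∀ (t : List Char) (d : Bool) (a : Option String)
    (s : List Char) (ss : List (List Char)), pvSegs cs = s :: ss →
    (let st := cs.foldl pvStep (a, t, d);
     pvCommit st.2.1 st.1)
    = pvRun ((if d then t else if t = [] then pvTok s else t ++ s.takeWhile pvP)
              :: ss.map pvTok) a := by
  induction cs with
  | nil =>
    intro t d a s ss hseg
    simp only [pvSegs] at hseg
    injection hseg with h1 h2; subst h1; subst h2
    simp only [List.foldl_nil, pvRun, List.map_nil, List.foldl_cons, List.foldl_nil]
    cases d with
    | true => rfl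
    | false =>
      by_cases ht : t = []
      · simp [ht, pvTok, pvCommit]
      · simp [ht, pvCommit]
  | cons c cs ih =>
    intro t d a s ss hseg
    obtain ⟨s', ss', hseg'⟩ : ∃ s' ss', pvSegs cs = s' :: ss' := by
      cases h : pvSegs cs with
      | nil => exact absurd h (pvSegs_ne_nil cs)
      | cons x xs => exact ⟨x, xs, rfl⟩
    by_cases hc : c = ','
    · subst hc
      rw [show pvSegs (',' :: cs) = [] :: pvSegs cs from by simp [pvSegs]] at hseg
      rw [hseg'] at hseg
      injection hseg with h1 h2; subst h1; subst h2
      simp only [List.foldl_cons]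
      rw [show pvStep (a, t, d) ',' = (pvCommit t a, [], false) from by
        simp [pvStep, pvCommit]]
      rw [ih [] false (pvCommit t a) s' ss' hseg']
      simp only [pvRun, List.map_cons, List.foldl_cons, if_neg (Bool.false_ne_true), if_pos rfl]
      congr 1
      cases d with
      | true => simp [pvCommit, pvTok]
      | false =>
        by_cases ht : t = [] <;> simp [ht, pvCommit, pvTok]
    · rw [show pvSegs (c :: cs) = match pvSegs cs with
            | [] => [[c]] | s :: ss => (c :: s) :: ss from by simp [pvSegs, hc]] at hseg
      rw [hseg'] at hseg
      injection hseg with h1 h2; subst h1; subst h2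
      simp only [List.foldl_cons]
      by_cases hs : PySem.Chars.isspace c
      · rw [show pvStep (a, t, d) c = (a, t, if t = [] then d else true) from by
          simp [pvStep, hc, hs]]
        rw [ih t (if t = [] then d else true) a s' ss' hseg']
        congr 2
        cases d with
        | true => simp
        | false =>
          by_cases ht : t = []
          · simp [ht, pvTok, List.dropWhile_cons_of_pos hs]
          · simp [ht, List.takeWhile_cons, pvP, hs]
      · cases d with
        | true =>
          rw [show pvStep (a, t, true) c = (a, t, true) from by simp [pvStep, hc, hs]]
          rw [ih t true a s' ss' hseg']
          simp
        | false =>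
          rw [show pvStep (a, t, false) c = (a, t ++ [c], false) from by
            simp [pvStep, hc, hs]]
          rw [ih (t ++ [c]) false a s' ss' hseg']
          congr 2
          by_cases ht : t = []
          · simp [ht, pvTok, List.dropWhile_cons_of_neg hs, List.takeWhile_cons, pvP, hs]
          · simp [ht, List.takeWhile_cons, pvP, hs]

-- pvRun over segment tokens = "last segment with a non-empty strip, then its token"
theorem pvRun_eq_last (segs : List (List Char)) : ∀ (a : Option String),
    pvRun (segs.map pvTok) a =
      match ((segs.map PySem.Chars.strip).filter (fun p => p ≠ [])).getLast? with
      | none => a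
      | some L => some (String.ofList (pvTok L)) := by
  induction segs with
  | nil => intro a; simp [pvRun]
  | cons seg rest ih =>
    intro a
    simp only [List.map_cons, pvRun, List.foldl_cons, List.filter_cons]
    by_cases h : PySem.Chars.strip seg = []
    · rw [if_neg (by simp [h])]
      have ht : pvTok seg = [] := (pvTok_eq_nil_iff seg).mpr h
      rw [show pvCommit (pvTok seg) a = a from by simp [pvCommit, ht]]
      exact ih a
    · rw [if_pos (by simp [h])]
      have ht : pvTok seg ≠ [] := fun hh => h ((pvTok_eq_nil_iff seg).mp hh)
      rw [show pvCommit (pvTok seg) a = some (String.ofList (pvTok seg)) from by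
        simp [pvCommit, ht]]
      have hih := ih (some (String.ofList (pvTok seg)))
      unfold pvRun at hih
      rw [hih, List.getLast?_cons]
      cases hlast : ((rest.map PySem.Chars.strip).filter (fun p => p ≠ [])).getLast? with
      | none => simp [pvTok_strip seg h]
      | some L => simp

theorem pvSegs_cons_exists (cs : List Char) : ∃ s ss, pvSegs cs = s :: ss := by
  cases h : pvSegs cs with
  | nil => exact absurd h (pvSegs_ne_nil cs)
  | cons x xs => exact ⟨x, xs, rfl⟩

theorem pyGet?_zero_head (l : List String) : PySem.List.pyGet? l 0 = l.head? := by
  simp [PySem.List.pyGet?, PySem.List.pyIdx?]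
  cases l <;> simp

-- B's port equals pvRun over the tokens of the segments
theorem pvAlt_eq (srcset : String) :
    pick_srcset_url_py_alt srcset = pvRun ((pvSegs srcset.toList).map pvTok) none := by
  obtain ⟨s, ss, hseg⟩ := pvSegs_cons_exists srcset.toList
  have h := pvStep_run srcset.toList [] false none s ss hseg
  simp only [Bool.false_eq_true, if_false] at h
  rw [hseg, List.map_cons]
  exact h

theorem filter_ofList (X : List (List Char)) :
    ((X.map String.ofList).filter (fun p => p ≠ "")) =
      (X.filter (fun p => p ≠ [])).map String.ofList := by
  induction X with
  | nil => simp
  | cons x xs ih =>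
    simp only [List.map_cons, List.filter_cons]
    by_cases hx : x = []
    · rw [if_neg (by simp [hx]), if_neg (by simp [hx])]
      exact ih
    · rw [if_pos (by simp [hx]), if_pos (by simp [hx])]
      rw [List.map_cons, ih]

-- A's port equals "last segment with a non-empty strip, then its first token"
theorem pvA_eq (srcset : String) (hne : srcset ≠ "") :
    pick_srcset_url_py srcset =
      match (((pvSegs srcset.toList).map PySem.Chars.strip).filter (fun p => p ≠ [])).getLast? with
      | none => none
      | some L => some (String.ofList (pvTok L)) := by
  unfold pick_srcset_url_py
  rw [if_neg hne]
  have hsplit : PySem.Str.split? srcset "," = some ((pvSegs srcset.toList).map String.ofList) := by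
    unfold PySem.Str.split? PySem.Chars.split?
    simp [splitOn_comma_eq]
  rw [hsplit]
  simp only [Option.getD_some]
  have hmap : ((pvSegs srcset.toList).map String.ofList).map PySem.Str.strip
      = ((pvSegs srcset.toList).map PySem.Chars.strip).map String.ofList := by
    rw [List.map_map, List.map_map]
    simp [Function.comp_def, PySem.Str.strip, String.toList_ofList]
  rw [hmap, filter_ofList]
  set F := ((pvSegs srcset.toList).map PySem.Chars.strip).filter (fun p => p ≠ []) with hF
  by_cases hFe : F = []
  · rw [hFe]; simp
  · rw [if_neg (by simpa using hFe)]
    obtain ⟨L, hL⟩ : ∃ L, F.getLast? = some L := by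
      cases h : F.getLast? with
      | none => exact absurd (List.getLast?_eq_none_iff.mp h) hFe
      | some L => exact ⟨L, rfl⟩
    rw [PySem.List.pyGet?_neg_one, List.getLast?_map, hL]
    simp only [Option.map_some]
    -- L is the strip of some segment, and it is non-empty
    have hLmem : L ∈ F := List.mem_of_getLast? hL
    rw [hF, List.mem_filter] at hLmem
    obtain ⟨hLmap, hLne'⟩ := hLmem
    have hLne : L ≠ [] := by simpa using hLne'
    obtain ⟨seg, _, hLseg⟩ := List.mem_map.mp hLmap
    obtain ⟨c, t, hct, hcns⟩ := strip_head seg (by rw [hLseg]; exact hLne)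
    rw [hLseg] at hct
    -- candidate = first token of L
    have hsplit₀ : PySem.Str.split₀ (String.ofList L) = (PySem.Chars.split₀ L).map String.ofList := by
      unfold PySem.Str.split₀
      rw [String.toList_ofList]
    rw [hsplit₀, pyGet?_zero_head, split₀_eq, List.head?_map]
    rw [show (pvAux [] L).head? = some (pvTok L) from
      pvAux_head L (by rw [hct, List.dropWhile_cons_of_neg (by simp [hcns])]; simp)]
    simp only [Option.map_some]
    show (if String.ofList (pvTok L) = "" then none else some (String.ofList (pvTok L)))
        = some (String.ofList (pvTok L))
    have htok : pvTok L ≠ [] := by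
      unfold pvTok
      rw [hct, List.dropWhile_cons_of_neg (by simp [hcns]),
        List.takeWhile_cons_of_pos (by simp [pvP, hcns])]
      simp
    rw [if_neg (by simpa [String.ofList_eq_empty_iff] using htok)]

-- ===== VERDICT (by name: the statement is the Claim_ definition above) =====
theorem pick_srcset_url_py_spec : Claim_equal_pick_srcset_url_py := by
  intro srcset _
  unfold Spec_pick_srcset_url_py
  by_cases h : srcset = ""
  · subst h; decide
  · rw [pvA_eq srcset h, pvAlt_eq srcset, pvRun_eq_last]
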